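-- pv_equiv track=rewrite | github.com/m-adamek/Mock3 | mock3-2/p1.py | f
-- ===== SOURCE A (Python) =====
-- def f(n):
--     # Zamiana liczby na listę cyfr
--     digits = []
--     for d in str(n):
--         digits.append(int(d))
--
--     # Wyodrębnienie cyfr nieparzystych
--     odd_digits = []
--     for d in digits:
--         if d % 2 != 0:
--             odd_digits.append(d)
--
--     # Jeśli brak cyfr nieparzystych, zwróć -1
--     if len(odd_digits) == 0:
--         return -1
--
--     # Obliczenie największej i najmniejszej cyfry nieparzystej
--     max_odd = max(odd_digits)
--     min_odd = min(odd_digits)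
--
--     # Zwrócenie różnicy między największą a najmniejszą cyfrą
--     return max_odd - min_odd
-- ===== SOURCE B (Python) =====
-- def f(n):
--     # Record the set of digits that occur, then scan the five odd digit
--     # values 1,3,5,7,9 from each end: no min()/max() over collected digits.
--     seen = set()
--     for c in str(n):
--         seen.add(int(c))
--     for lo in (1, 3, 5, 7, 9):
--         if lo in seen:
--             break
--     else:
--         return -1
--     for hi in (9, 7, 5, 3, 1):
--         if hi in seen:
--             break
--     return hi - lo
-- ===== Notes on version B (the rewrite author's own statement) =====
-- stated objective: alternative
-- what changed: Instead of collecting digit lists and taking max()-min() of the odd ones, B builds the set of digits present and scans the constant candidate tuple (1,3,5,7,9) upward for the smallest odd digit present and (9,7,5,3,1) downward for the largest - a counting/bucket approach with no extremum computation over the data.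
import Mathlib
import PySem

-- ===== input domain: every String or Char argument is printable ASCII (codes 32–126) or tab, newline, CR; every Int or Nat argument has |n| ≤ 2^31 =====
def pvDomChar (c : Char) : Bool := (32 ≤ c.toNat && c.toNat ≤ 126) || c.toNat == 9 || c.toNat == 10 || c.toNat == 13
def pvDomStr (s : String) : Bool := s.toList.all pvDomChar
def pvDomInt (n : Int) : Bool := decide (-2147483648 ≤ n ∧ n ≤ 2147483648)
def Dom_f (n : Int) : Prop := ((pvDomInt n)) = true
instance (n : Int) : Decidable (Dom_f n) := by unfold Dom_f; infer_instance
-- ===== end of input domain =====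

-- B replaces A's list-building and max()-min() over odd digits by a set of digits seen plus a
-- constant scan of the odd candidates 1,3,5,7,9 from each end; same return value wherever A returns.

-- int(c) for a one-character string, shared transliteration of `int(d)` in both programs
def pvConv (c : Char) : Int := (PySem.Int.ofStr? (String.mk [c])).getD 0

-- ===== PORT A =====
def f (n : Int) : Int :=
  let digits := (PySem.Int.toStr n).toList.foldl (fun acc c => acc ++ [pvConv c]) []
  let odd_digits := digits.foldl (fun acc d => if PySem.Int.mod d 2 ≠ 0 then acc ++ [d] else acc) []
  if odd_digits.length = 0 then -1
  else
    ((PySem.List.max? odd_digits (fun y => y)).getD 0) -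
    ((PySem.List.min? odd_digits (fun y => y)).getD 0)

-- ===== PORT B =====
def f_alt (n : Int) : Int :=
  let seen : PySem.Set Int :=
    (PySem.Int.toStr n).toList.foldl (fun s c => PySem.Set.add s (pvConv c)) PySem.Set.empty
  -- `for lo in (1,3,5,7,9): if lo in seen: break / else: return -1` = find? over the tuple
  match ([1, 3, 5, 7, 9] : List Int).find? (fun k => PySem.Set.contains seen k) with
  | none => -1
  | some lo =>
    match ([9, 7, 5, 3, 1] : List Int).find? (fun k => PySem.Set.contains seen k) with
    | some hi => hi - lo
    | none => 1 - lo   -- loop falls through: hi keeps the last value 1 (unreachable when lo was found)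

-- ===== PRECONDITION & SPEC =====
-- Pre_ excludes negative n: there str(n) starts with '-' and int('-') raises ValueError in A (and in B).
def Pre_f (n : Int) : Prop := 0 ≤ n
instance (n : Int) : Decidable (Pre_f n) := by unfold Pre_f; infer_instance
def pvWitness_f : Int := (135)
def Spec_f (n : Int) (out : Int) : Prop := out = f_alt n
instance (n : Int) (out : Int) : Decidable (Spec_f n out) := by unfold Spec_f; infer_instance

-- ===== CLAIM (what is proved, stated in full; the proofs are below) =====
def Claim_equal_f : Prop := ∀ (n : Int), Dom_f n → Pre_f n → Spec_f n (f n)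

-- ===== LEMMAS AND PROOFS =====

def pvOdd (d : Int) : Bool := decide (PySem.Int.mod d 2 ≠ 0)

theorem foldl_snoc_map (cs : List Char) (acc : List Int) :
    cs.foldl (fun acc c => acc ++ [pvConv c]) acc = acc ++ cs.map pvConv := by
  induction cs generalizing acc with
  | nil => simp
  | cons c t ih => simp [List.foldl, ih]

theorem foldl_filter_odd (ds : List Int) (acc : List Int) :
    ds.foldl (fun acc d => if PySem.Int.mod d 2 ≠ 0 then acc ++ [d] else acc) acc
      = acc ++ ds.filter pvOdd := by
  induction ds generalizing acc with
  | nil => simp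
  | cons d t ih =>
    rw [List.foldl_cons, ih, List.filter_cons]
    simp only [pvOdd, ne_eq, decide_not, Bool.not_eq_eq_eq_not, Bool.not_true,
      decide_eq_false_iff_not, ite_not]
    split_ifs <;> simp

-- digits of str(n) for n ≥ 0 convert to ints in 0..9
theorem mem_toDigitsCore_bounds : ∀ (fuel m : Nat) (acc : List Char) (c : Char),
    c ∈ Nat.toDigitsCore 10 fuel m acc → c ∈ acc ∨ (0 ≤ pvConv c ∧ pvConv c ≤ 9) := by
  have hd : ∀ r : Nat, r < 10 → 0 ≤ pvConv (Nat.digitChar r) ∧ pvConv (Nat.digitChar r) ≤ 9 := by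
    decide
  intro fuel
  induction fuel with
  | zero => intro m acc c h; exact Or.inl h
  | succ fuel ih =>
    intro m acc c h
    have hd' := hd (m % 10) (Nat.mod_lt _ (by omega))
    simp only [Nat.toDigitsCore] at h
    by_cases hz : m / 10 = 0
    · rw [if_pos hz] at h
      rcases List.mem_cons.mp h with rfl | h
      · exact Or.inr hd'
      · exact Or.inl h
    · rw [if_neg hz] at h
      rcases ih _ _ _ h with h | h
      · rcases List.mem_cons.mp h with rfl | h
        · exact Or.inr hd'
        · exact Or.inl h
      · exact Or.inr h

theorem conv_toChars_bounds (n : Int) (hn : 0 ≤ n) :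
    ∀ d ∈ ((PySem.Int.toChars n).map pvConv), 0 ≤ d ∧ d ≤ 9 := by
  intro d hd
  rcases List.mem_map.mp hd with ⟨c, hc, rfl⟩
  have : ¬ n < 0 := by omega
  simp only [PySem.Int.toChars, if_neg this] at hc
  rcases mem_toDigitsCore_bounds _ _ _ _ hc with h | h
  · simp at h
  · exact h

theorem seen_eq_ofList (cs : List Char) :
    cs.foldl (fun s c => PySem.Set.add s (pvConv c)) PySem.Set.empty
      = PySem.Set.ofList (cs.map pvConv) := by
  rw [PySem.Set.ofList_eq_foldl, List.foldl_map]; rfl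

theorem foldl_min_mem (t : List Int) : ∀ x : Int, t.foldl min x ∈ x :: t := by
  induction t with
  | nil => intro x; simp
  | cons a t ih =>
    intro x
    rcases List.mem_cons.mp (ih (min x a)) with h | h
    · rcases min_choice x a with hm | hm <;> rw [List.foldl_cons, h, hm] <;> simp
    · simp only [List.foldl_cons]
      exact List.mem_cons_of_mem _ (List.mem_cons_of_mem _ h)

theorem foldl_min_le (t : List Int) : ∀ x : Int, ∀ y ∈ x :: t, t.foldl min x ≤ y := by
  induction t with
  | nil => intro x y hy; simp_all
  | cons a t ih =>
    intro x y hy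
    simp only [List.mem_cons] at hy
    rcases hy with h | h | h
    · rw [h]; exact le_trans (ih (min x a) _ (show min x a ∈ min x a :: t by simp)) (min_le_left _ _)
    · rw [h]; exact le_trans (ih (min x a) _ (show min x a ∈ min x a :: t by simp)) (min_le_right _ _)
    · exact ih (min x a) _ (by simp [h])

theorem foldl_max_mem (t : List Int) : ∀ x : Int, t.foldl max x ∈ x :: t := by
  induction t with
  | nil => intro x; simp
  | cons a t ih =>
    intro x
    rcases List.mem_cons.mp (ih (max x a)) with h | h
    · rcases max_choice x a with hm | hm <;> rw [List.foldl_cons, h, hm] <;> simp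
    · simp only [List.foldl_cons]
      exact List.mem_cons_of_mem _ (List.mem_cons_of_mem _ h)

theorem foldl_le_max (t : List Int) : ∀ x : Int, ∀ y ∈ x :: t, y ≤ t.foldl max x := by
  induction t with
  | nil => intro x y hy; simp_all
  | cons a t ih =>
    intro x y hy
    simp only [List.mem_cons] at hy
    rcases hy with h | h | h
    · rw [h]; exact le_trans (le_max_left x a) (ih (max x a) _ (show max x a ∈ max x a :: t by simp))
    · rw [h]; exact le_trans (le_max_right x a) (ih (max x a) _ (show max x a ∈ max x a :: t by simp))
    · exact ih (max x a) _ (by simp [h])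

theorem odd_digit_cases (m : Int) (h0 : 0 ≤ m) (h9 : m ≤ 9) (hodd : pvOdd m = true) :
    m = 1 ∨ m = 3 ∨ m = 5 ∨ m = 7 ∨ m = 9 := by
  interval_cases m <;> simp_all <;> revert hodd <;> decide

theorem mem_ds_odd (ds : List Int) (k : Int) (hk : k ∈ ds) (hodd : pvOdd k = true) :
    k ∈ ds.filter pvOdd := List.mem_filter.mpr ⟨hk, hodd⟩

theorem find_lo_eq (ds : List Int) (m : Int)
    (hb : 0 ≤ m ∧ m ≤ 9) (hmem : m ∈ ds) (hodd : pvOdd m = true)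
    (hle : ∀ k ∈ ds, pvOdd k = true → m ≤ k) :
    ([1, 3, 5, 7, 9] : List Int).find? (fun k => decide (k ∈ ds)) = some m := by
  have hnot : ∀ k : Int, pvOdd k = true → k < m → k ∉ ds := by
    intro k hko hkm hkd
    exact absurd (hle k hkd hko) (by omega)
  rcases odd_digit_cases m hb.1 hb.2 hodd with rfl | rfl | rfl | rfl | rfl <;>
    simp [List.find?, hmem, hnot 1 (by decide), hnot 3 (by decide), hnot 5 (by decide),
      hnot 7 (by decide)]

theorem find_hi_eq (ds : List Int) (m : Int)
    (hb : 0 ≤ m ∧ m ≤ 9) (hmem : m ∈ ds) (hodd : pvOdd m = true)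
    (hle : ∀ k ∈ ds, pvOdd k = true → k ≤ m) :
    ([9, 7, 5, 3, 1] : List Int).find? (fun k => decide (k ∈ ds)) = some m := by
  have hnot : ∀ k : Int, pvOdd k = true → m < k → k ∉ ds := by
    intro k hko hkm hkd
    exact absurd (hle k hkd hko) (by omega)
  rcases odd_digit_cases m hb.1 hb.2 hodd with rfl | rfl | rfl | rfl | rfl <;>
    simp [List.find?, hmem, hnot 9 (by decide), hnot 7 (by decide), hnot 5 (by decide),
      hnot 3 (by decide)]

-- ===== VERDICT (by name: the statement is the Claim_ definition above) =====
theorem f_spec : Claim_equal_f := by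
  intro n _ hn
  unfold Spec_f f f_alt
  simp only [PySem.Int.toList_toStr, foldl_snoc_map, foldl_filter_odd, seen_eq_ofList,
    List.nil_append]
  set ds := (PySem.Int.toChars n).map pvConv with hds
  have hbounds := conv_toChars_bounds n hn
  have hcont : (fun k => PySem.Set.contains (PySem.Set.ofList ds) k)
      = (fun k => decide (k ∈ ds)) := by
    funext k
    rw [PySem.Set.contains_eq_decide]
    simp [PySem.Set.mem_ofList]
  rw [hcont]
  cases hod : ds.filter pvOdd with
  | nil =>
    have hnone : ([1, 3, 5, 7, 9] : List Int).find? (fun k => decide (k ∈ ds)) = none := by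
      rw [List.find?_eq_none]
      intro k hk
      simp only [decide_eq_true_eq]
      intro hkd
      have : k ∈ ds.filter pvOdd := mem_ds_odd ds k hkd (by fin_cases hk <;> decide)
      rw [hod] at this; simp at this
    simp [hnone]
  | cons x t =>
    have hxmem : ∀ y ∈ x :: t, y ∈ ds ∧ pvOdd y = true := by
      intro y hy
      have : y ∈ ds.filter pvOdd := by rw [hod]; exact hy
      exact ⟨(List.mem_filter.mp this).1, (List.mem_filter.mp this).2⟩
    have hm := foldl_min_mem t x
    have hM := foldl_max_mem t x
    have hmmem := hxmem _ hm
    have hMmem := hxmem _ hM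
    have hle : ∀ k ∈ ds, pvOdd k = true → t.foldl min x ≤ k := by
      intro k hk hko
      exact foldl_min_le t x k (hod ▸ mem_ds_odd ds k hk hko)
    have hge : ∀ k ∈ ds, pvOdd k = true → k ≤ t.foldl max x := by
      intro k hk hko
      exact foldl_le_max t x k (hod ▸ mem_ds_odd ds k hk hko)
    rw [find_lo_eq ds _ (hbounds _ hmmem.1) hmmem.1 hmmem.2 hle,
      find_hi_eq ds _ (hbounds _ hMmem.1) hMmem.1 hMmem.2 hge]
    simp [PySem.List.max?_id_cons, PySem.List.min?_id_cons]
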